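-- pv_equiv track=rewrite | github.com/HishamKhalil1990/automation | automation/automation.py | phone_filter
-- ===== SOURCE A (Python) =====
-- def phone_filter(phone_list):
--     new_phonelist = []
--     for numbmer in phone_list:
--         new_num = ""
--         jump = False
--         counter = 0
--         for num in numbmer:
--             if not jump:
--                 if counter < 10:
--                     try:
--                         num = int(num)
--                         if counter == 3 or counter == 6:
--                             new_num += "-"
--                         new_num += str(num)
--                         counter += 1
--                     except ValueError:
--                         pass
--             if num == '+':
--                 jump = True
--             else:
--                 jump = False
--         if len(new_num) == 11:
--             mod_num = "206-"
--             new_num = [int(num) for num in new_num if num != "-"]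
--             counter_in = 1
--             for num in new_num:
--                 if counter_in <= 7:
--                     if counter_in == 4:
--                         mod_num += "-"
--                     mod_num += str(num)
--                 counter_in += 1
--             new_num = mod_num
--         new_phonelist.append(new_num)
--     return new_phonelist
-- ===== SOURCE B (Python) =====
-- def phone_filter(phone_list):
--     result = []
--     for number in phone_list:
--         digits = []
--         prev_plus = False
--         for ch in number:
--             if not prev_plus and len(digits) < 10 and '0' <= ch <= '9':
--                 digits.append(ch)
--             prev_plus = (ch == '+')
--         d = ''.join(digits)
--         if len(d) == 9:
--             d = '206-' + d[:3] + '-' + d[3:7]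
--         elif len(d) >= 7:
--             d = d[:3] + '-' + d[3:6] + '-' + d[6:]
--         elif len(d) >= 4:
--             d = d[:3] + '-' + d[3:]
--         result.append(d)
--     return result
-- ===== Notes on version B (the rewrite author's own statement) =====
-- stated objective: simpler
-- what changed: B collects the surviving digit characters in one pass and produces the dashed format (including the 9-digit '206-' case) by slicing the digit string, replacing A's inline dash insertion with a positional counter plus a second strip-and-rebuild loop for the 9-digit case; dropping repeated string += and per-char try/except also makes it measurably faster.
import Mathlib
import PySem

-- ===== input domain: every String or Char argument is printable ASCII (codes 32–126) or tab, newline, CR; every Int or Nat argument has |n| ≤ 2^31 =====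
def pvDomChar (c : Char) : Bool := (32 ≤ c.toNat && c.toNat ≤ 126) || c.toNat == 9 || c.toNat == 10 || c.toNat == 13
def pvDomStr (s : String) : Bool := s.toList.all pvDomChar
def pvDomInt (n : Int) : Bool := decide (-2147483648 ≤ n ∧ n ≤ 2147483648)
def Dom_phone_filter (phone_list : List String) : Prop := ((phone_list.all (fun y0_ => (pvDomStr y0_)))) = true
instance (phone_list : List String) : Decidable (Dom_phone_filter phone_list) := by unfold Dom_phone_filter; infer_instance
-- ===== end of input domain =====

-- B re-implements A's per-string reformatting by first collecting the surviving digits in one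
-- pass and then formatting with slices, instead of A's inline dash insertion plus a second
-- strip-and-rebuild loop; objective: simpler.

-- ===== PORT A =====
-- inner character loop of A: state = (new_num, jump, counter)
def pvAInner (st : List Char × Bool × Nat) (c : Char) : List Char × Bool × Nat :=
  let acc := st.1
  let jump := st.2.1
  let counter := st.2.2
  let p : List Char × Nat :=
    if !jump then
      if counter < 10 then
        -- try: num = int(num)  (int() on the one-character string)
        match PySem.Int.ofChars? [c] with
        | some v =>
            ((if counter == 3 || counter == 6 then acc ++ ['-'] else acc)
               ++ PySem.Int.toChars v, counter + 1)
        | none => (acc, counter)  -- except ValueError: pass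
      else (acc, counter)
    else (acc, counter)
  -- `if num == '+'`: num was rebound to an int exactly when int() succeeded, and an int never
  -- equals '+'; a character that parses as an int is itself never '+', so this equals (c == '+')
  (p.1, c == '+', p.2)

-- tail of A's outer loop body: the len == 11 ("206-") special case
def pvAFinish (newNum : List Char) : List Char :=
  if newNum.length == 11 then
    -- [int(num) for num in new_num if num != "-"]; int() cannot fail here since the kept
    -- characters are exactly the digit characters of new_num, hence the .getD 0
    let ints : List Int :=
      (newNum.filter (fun ch => decide (ch ≠ '-'))).map
        (fun ch => (PySem.Int.ofChars? [ch]).getD 0)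
    (ints.foldl
      (fun (st : List Char × Nat) v =>
        ((if st.2 ≤ 7 then
            (if st.2 == 4 then st.1 ++ ['-'] else st.1) ++ PySem.Int.toChars v
          else st.1), st.2 + 1))
      (['2', '0', '6', '-'], 1)).1
  else newNum

def pvAProc (s : String) : String :=
  String.ofList (pvAFinish (s.toList.foldl pvAInner ([], false, 0)).1)

def phone_filter (phone_list : List String) : List String :=
  phone_list.foldl (fun acc s => acc ++ [pvAProc s]) []

-- ===== PORT B =====
-- one pass collecting surviving digit characters; state = (digits, prev_plus)
def pvBStep (st : List Char × Bool) (c : Char) : List Char × Bool :=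
  (if !st.2 && st.1.length < 10 && (decide (48 ≤ c.toNat) && decide (c.toNat ≤ 57))  -- '0' <= ch <= '9'
   then st.1 ++ [c] else st.1,
   c == '+')

-- slice-based formatting of the collected digits d; Python's d[a:b] for 0 ≤ a ≤ b is (d.take b).drop a
def pvBFormat (d : List Char) : List Char :=
  if d.length == 9 then ['2', '0', '6', '-'] ++ d.take 3 ++ ['-'] ++ (d.take 7).drop 3
  else if 7 ≤ d.length then d.take 3 ++ ['-'] ++ (d.take 6).drop 3 ++ ['-'] ++ d.drop 6
  else if 4 ≤ d.length then d.take 3 ++ ['-'] ++ d.drop 3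
  else d

def pvBProc (s : String) : String :=
  String.ofList (pvBFormat (s.toList.foldl pvBStep ([], false)).1)

def phone_filter_alt (phone_list : List String) : List String :=
  phone_list.map pvBProc

-- ===== PRECONDITION & SPEC =====
def Spec_phone_filter (phone_list : List String) (out : List String) : Prop := out = phone_filter_alt phone_list
instance (phone_list : List String) (out : List String) : Decidable (Spec_phone_filter phone_list out) := by unfold Spec_phone_filter; infer_instance

-- ===== CLAIM (what is proved, stated in full; the proofs are below) =====
def Claim_equal_phone_filter : Prop := ∀ (phone_list : List String), Dom_phone_filter phone_list → Spec_phone_filter phone_list (phone_filter phone_list)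

-- ===== LEMMAS AND PROOFS =====

-- int(c) on a single domain character succeeds exactly on '0'..'9', yielding its digit value
set_option maxHeartbeats 1000000 in
theorem pvOfChars_dom (c : Char) (hd : pvDomChar c = true) :
    PySem.Int.ofChars? [c] =
      (if 48 ≤ c.toNat ∧ c.toNat ≤ 57 then some ((c.toNat : Int) - 48) else none) := by
  have h0 : c = Char.ofNat c.toNat := (Char.ofNat_toNat c).symm
  have h1 : 9 ≤ c.toNat ∧ c.toNat ≤ 126 := by unfold pvDomChar at hd; simp at hd; omega
  obtain ⟨hl, hr⟩ := h1
  interval_cases h : c.toNat <;> rw [h0] <;> decide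

theorem pvToChars_digit (c : Char) (h1 : 48 ≤ c.toNat) (h2 : c.toNat ≤ 57) :
    PySem.Int.toChars ((c.toNat : Int) - 48) = [c] := by
  have h0 : c = Char.ofNat c.toNat := (Char.ofNat_toNat c).symm
  interval_cases h : c.toNat <;> rw [h0] <;> decide

-- the dash pattern A's inner loop maintains over the digits collected so far
def pvFmt (ds : List Char) : List Char :=
  if ds.length ≤ 3 then ds
  else if ds.length ≤ 6 then ds.take 3 ++ '-' :: ds.drop 3
  else ds.take 3 ++ '-' :: ((ds.take 6).drop 3 ++ '-' :: ds.drop 6)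

theorem pvFmt_snoc (ds : List Char) (c : Char) (h : ds.length < 10) :
    pvFmt (ds ++ [c]) =
      (if ds.length = 3 ∨ ds.length = 6 then pvFmt ds ++ ['-'] else pvFmt ds) ++ [c] := by
  unfold pvFmt
  simp only [List.length_append, List.length_cons, List.length_nil]
  rcases Nat.lt_or_ge ds.length 3 with h3 | h3
  · rw [if_pos (by omega), if_neg (by omega), if_pos (by omega)]
  rcases eq_or_ne ds.length 3 with h33 | hne3
  · rw [if_neg (by omega), if_pos (by omega), if_pos (by omega), if_pos (by omega)]
    simp [h33]
  rcases Nat.lt_or_ge ds.length 6 with h6 | h6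
  · rw [if_neg (by omega), if_pos (by omega), if_neg (by omega), if_neg (by omega), if_pos (by omega)]
    simp [List.take_append, List.drop_append, show (3 : Nat) - ds.length = 0 by omega]
  rcases eq_or_ne ds.length 6 with h66 | hne6
  · rw [if_neg (by omega), if_neg (by omega), if_pos (by omega), if_neg (by omega), if_pos (by omega)]
    simp [List.take_append, h66, show (3 : Nat) - (6 : Nat) = 0 by omega]
  · rw [if_neg (by omega), if_neg (by omega), if_neg (by omega), if_neg (by omega), if_neg (by omega)]
    simp [List.take_append, List.drop_append, show (3 : Nat) - ds.length = 0 by omega,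
      show (6 : Nat) - ds.length = 0 by omega]

-- B's collector only ever appends digit characters and never exceeds 10 of them
theorem pvBStep_inv (s : List Char) :
    ∀ ds : List Char, ∀ jump : Bool,
      (∀ c ∈ ds, 48 ≤ c.toNat ∧ c.toNat ≤ 57) → ds.length ≤ 10 →
      (∀ c ∈ (s.foldl pvBStep (ds, jump)).1, 48 ≤ c.toNat ∧ c.toNat ≤ 57) ∧
        (s.foldl pvBStep (ds, jump)).1.length ≤ 10 := by
  induction s with
  | nil => intro ds jump hdig hlen; exact ⟨hdig, hlen⟩
  | cons c s ih =>
    intro ds jump hdig hlen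
    rw [List.foldl_cons]
    unfold pvBStep
    split
    · next hcond =>
      simp only [Bool.and_eq_true, decide_eq_true_eq] at hcond
      refine ih _ _ ?_ ?_
      · intro x hx
        rcases List.mem_append.1 hx with hx | hx
        · exact hdig x hx
        · simp only [List.mem_singleton] at hx; subst hx
          exact ⟨hcond.2.1, hcond.2.2⟩
      · simp only [List.length_append, List.length_cons, List.length_nil]
        omega
    · exact ih _ _ hdig hlen

-- the loop correspondence: A's state is (pvFmt digits, prev_plus, digits.length)
theorem pvLoop_eq (s : List Char) (hdom : ∀ c ∈ s, pvDomChar c = true) :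
    ∀ ds : List Char, ∀ jump : Bool,
      (∀ c ∈ ds, 48 ≤ c.toNat ∧ c.toNat ≤ 57) → ds.length ≤ 10 →
      s.foldl pvAInner (pvFmt ds, jump, ds.length) =
        (pvFmt (s.foldl pvBStep (ds, jump)).1, (s.foldl pvBStep (ds, jump)).2,
          (s.foldl pvBStep (ds, jump)).1.length) := by
  induction s with
  | nil => intro ds jump hdig hlen; rfl
  | cons c s ih =>
    intro ds jump hdig hlen
    have hc : pvDomChar c = true := hdom c (List.mem_cons_self ..)
    have hdom' : ∀ x ∈ s, pvDomChar x = true := fun x hx => hdom x (List.mem_cons_of_mem _ hx)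
    rw [List.foldl_cons, List.foldl_cons]
    have hstep :
        pvAInner (pvFmt ds, jump, ds.length) c =
          (pvFmt (pvBStep (ds, jump) c).1, (pvBStep (ds, jump) c).2,
            (pvBStep (ds, jump) c).1.length) := by
      unfold pvAInner pvBStep
      cases jump with
      | true => simp
      | false =>
        simp only [Bool.not_false, if_true, Bool.true_and]
        by_cases hlt : ds.length < 10
        · rw [pvOfChars_dom c hc]
          by_cases hdig10 : 48 ≤ c.toNat ∧ c.toNat ≤ 57
          · rw [if_pos hdig10, if_pos hlt]
            have hb : (decide (ds.length < 10) && (decide (48 ≤ c.toNat) && decide (c.toNat ≤ 57))) = true := by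
              simp [hlt, hdig10.1, hdig10.2]
            rw [if_pos hb]
            dsimp only
            rw [pvToChars_digit c hdig10.1 hdig10.2, pvFmt_snoc ds c hlt]
            simp only [Prod.mk.injEq, List.length_append, List.length_cons, List.length_nil]
            refine ⟨?_, True.intro⟩
            by_cases h36 : ds.length = 3 ∨ ds.length = 6
            · rw [if_pos h36,
                if_pos (show (ds.length == 3 || ds.length == 6) = true by
                  rcases h36 with h | h <;> simp [h])]
            · rw [if_neg h36,
                if_neg (show ¬((ds.length == 3 || ds.length == 6) = true) by
                  simp only [Bool.or_eq_true, beq_iff_eq]; exact h36)]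
          · rw [if_neg hdig10]
            have hcond : (decide (48 ≤ c.toNat) && decide (c.toNat ≤ 57)) = false := by
              rcases Decidable.not_and_iff_not_or_not.1 hdig10 with h | h <;> simp [h]
            simp [hcond, hlt]
        · have h10 : ds.length = 10 := by omega
          simp [h10]
    rw [hstep]
    exact ih hdom' _ _
      (pvBStep_inv [c] ds jump hdig hlen).1
      (pvBStep_inv [c] ds jump hdig hlen).2

-- characters ≥ '0' are not '-'
theorem pvNeDash (c : Char) (h : 48 ≤ c.toNat) : c ≠ '-' := by
  intro hh; rw [hh] at h; exact absurd h (by decide)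

-- the final formatting agrees on any collected digit list
theorem pvFinish_eq (ds : List Char)
    (hdig : ∀ c ∈ ds, 48 ≤ c.toNat ∧ c.toNat ≤ 57) (hlen : ds.length ≤ 10) :
    pvAFinish (pvFmt ds) = pvBFormat ds := by
  rcases Nat.lt_or_ge ds.length 4 with h4 | h4
  · -- 0..3 digits: no dashes at all
    rw [show pvFmt ds = ds from by unfold pvFmt; rw [if_pos (by omega)]]
    unfold pvAFinish pvBFormat
    rw [if_neg (show ¬((ds.length == 11) = true) by simp; omega),
      if_neg (show ¬((ds.length == 9) = true) by simp; omega),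
      if_neg (by omega), if_neg (by omega)]
  rcases Nat.lt_or_ge ds.length 7 with h7 | h7
  · -- 4..6 digits: one dash
    have hf : pvFmt ds = ds.take 3 ++ '-' :: ds.drop 3 := by
      unfold pvFmt; rw [if_neg (by omega), if_pos (by omega)]
    have hflen : (ds.take 3 ++ '-' :: ds.drop 3).length = ds.length + 1 := by
      simp only [List.length_append, List.length_cons, List.length_take, List.length_drop]
      omega
    unfold pvAFinish pvBFormat
    rw [hf, if_neg (show ¬(((ds.take 3 ++ '-' :: ds.drop 3).length == 11) = true) by
        simp only [beq_iff_eq, hflen]; omega),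
      if_neg (show ¬((ds.length == 9) = true) by simp; omega),
      if_neg (by omega), if_pos (by omega)]
    simp
  rcases eq_or_ne ds.length 9 with h9 | hne9
  · -- exactly 9 digits: A's "206-" rebuild loop vs B's slice formula
    rcases ds with _|⟨a,_|⟨b,_|⟨c1,_|⟨d1,_|⟨e1,_|⟨f1,_|⟨g1,_|⟨h1,_|⟨i1,tl⟩⟩⟩⟩⟩⟩⟩⟩⟩ <;>
      simp only [List.length_cons, List.length_nil] at h9 <;> try omega
    have htl : tl = [] := List.eq_nil_of_length_eq_zero (by omega)
    subst htl
    have ha := hdig a (by simp); have hb := hdig b (by simp)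
    have hc := hdig c1 (by simp); have hd := hdig d1 (by simp)
    have he := hdig e1 (by simp); have hf := hdig f1 (by simp)
    have hg := hdig g1 (by simp); have hh := hdig h1 (by simp)
    have hi := hdig i1 (by simp)
    have na := pvNeDash a ha.1; have nb := pvNeDash b hb.1
    have nc := pvNeDash c1 hc.1; have nd := pvNeDash d1 hd.1
    have ne' := pvNeDash e1 he.1; have nf := pvNeDash f1 hf.1
    have ng := pvNeDash g1 hg.1; have nh := pvNeDash h1 hh.1
    have ni := pvNeDash i1 hi.1
    have dm : ∀ x : Char, 48 ≤ x.toNat → x.toNat ≤ 57 → pvDomChar x = true := by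
      intro x h1 h2; unfold pvDomChar; simp; omega
    have ev : ∀ x : Char, 48 ≤ x.toNat → x.toNat ≤ 57 →
        (PySem.Int.ofChars? [x]).getD 0 = (x.toNat : Int) - 48 := by
      intro x h1 h2; rw [pvOfChars_dom x (dm x h1 h2), if_pos ⟨h1, h2⟩]; rfl
    simp [pvAFinish, pvBFormat, pvFmt, List.filter, na, nb, nc, nd, ne', nf, ng, nh, ni,
      ev a ha.1 ha.2, ev b hb.1 hb.2, ev c1 hc.1 hc.2, ev d1 hd.1 hd.2,
      ev e1 he.1 he.2, ev f1 hf.1 hf.2, ev g1 hg.1 hg.2,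
      pvToChars_digit a ha.1 ha.2, pvToChars_digit b hb.1 hb.2,
      pvToChars_digit c1 hc.1 hc.2, pvToChars_digit d1 hd.1 hd.2,
      pvToChars_digit e1 he.1 he.2, pvToChars_digit f1 hf.1 hf.2,
      pvToChars_digit g1 hg.1 hg.2, List.foldl]
  · -- 7, 8 or 10 digits: two dashes
    have hf : pvFmt ds = ds.take 3 ++ '-' :: ((ds.take 6).drop 3 ++ '-' :: ds.drop 6) := by
      unfold pvFmt; rw [if_neg (by omega), if_neg (by omega)]
    have hflen : (ds.take 3 ++ '-' :: ((ds.take 6).drop 3 ++ '-' :: ds.drop 6)).length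
        = ds.length + 2 := by
      simp only [List.length_append, List.length_cons, List.length_take, List.length_drop]
      omega
    unfold pvAFinish pvBFormat
    rw [hf, if_neg (show ¬((((ds.take 3 ++ '-' :: ((ds.take 6).drop 3 ++ '-' :: ds.drop 6)).length) == 11) = true) by
        simp only [beq_iff_eq, hflen]; omega),
      if_neg (show ¬((ds.length == 9) = true) by simp; omega),
      if_pos (by omega)]
    simp

theorem pvProc_eq (s : String) (h : pvDomStr s = true) : pvAProc s = pvBProc s := by
  have hdom : ∀ c ∈ s.toList, pvDomChar c = true := by
    simpa [pvDomStr, List.all_eq_true] using h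
  have main := pvLoop_eq s.toList hdom [] false (by simp) (by simp)
  have h0 : (([], false, 0) : List Char × Bool × Nat) = (pvFmt [], false, ([] : List Char).length) := rfl
  unfold pvAProc pvBProc
  rw [h0, main]
  have hinv := pvBStep_inv s.toList [] false (by simp) (by simp)
  rw [pvFinish_eq _ hinv.1 hinv.2]

-- ===== VERDICT (by name: the statement is the Claim_ definition above) =====
theorem phone_filter_spec : Claim_equal_phone_filter := by
  intro l hdom
  unfold Spec_phone_filter phone_filter phone_filter_alt
  rw [PySem.List.foldl_append_singleton_eq_map]
  refine List.map_congr_left ?_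
  intro s hs
  unfold Dom_phone_filter at hdom
  rw [List.all_eq_true] at hdom
  exact pvProc_eq s (hdom s hs)
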